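-- pv_equiv track=rewrite | github.com/Alvannwanorim/DSA_2024 | Hash Table/same_numbers.py | sameNumbers2
-- ===== SOURCE A (Python) =====
-- from typing import List
--
-- def sameNumbers2(nums1: List[int], nums2: List[int]):
--     hashMap = {}
--     for n in nums1:
--         if n not in hashMap:
--             hashMap[n] = 1
--         else:
--             hashMap[n] += 1
--     for n in nums2:
--         if n not in hashMap:
--             return False
--         hashMap[n] -= 1
--         if hashMap[n] < 0:
--             return False
--     return True
-- ===== SOURCE B (Python) =====
-- def sameNumbers2(nums1, nums2):
--     count1 = {}
--     for n in nums1: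
--         count1[n] = count1.get(n, 0) + 1
--     count2 = {}
--     for n in nums2:
--         count2[n] = count2.get(n, 0) + 1
--     for k, v in count2.items():
--         if count1.get(k, 0) < v:
--             return False
--     return True
-- ===== Notes on version B (the rewrite author's own statement) =====
-- stated objective: simpler
-- what changed: Replaces the count-then-destructively-decrement-with-early-exit pass over nums2 by building two independent frequency maps and one key-by-key comparison pass over the distinct keys of nums2
import Mathlib
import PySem

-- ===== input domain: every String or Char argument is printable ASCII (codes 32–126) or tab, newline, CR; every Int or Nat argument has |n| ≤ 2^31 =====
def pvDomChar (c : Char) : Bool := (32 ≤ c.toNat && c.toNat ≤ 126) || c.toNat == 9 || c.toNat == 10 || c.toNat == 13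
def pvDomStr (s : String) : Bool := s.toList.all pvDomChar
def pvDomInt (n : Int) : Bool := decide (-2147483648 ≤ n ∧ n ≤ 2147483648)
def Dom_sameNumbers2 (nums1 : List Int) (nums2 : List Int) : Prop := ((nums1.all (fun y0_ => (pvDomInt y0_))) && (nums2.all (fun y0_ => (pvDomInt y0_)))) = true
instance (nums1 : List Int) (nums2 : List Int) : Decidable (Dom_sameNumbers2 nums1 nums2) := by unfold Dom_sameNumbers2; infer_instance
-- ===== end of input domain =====

-- B replaces A's destructive decrement-with-early-exit pass over nums2 by two independent
-- frequency maps compared key by key (objective: simpler); return values are proved equal.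

-- ===== PORT A =====
-- first loop: build hashMap counting nums1 (branching exactly as A does)
def sameNumbers2Build (nums1 : List Int) : PySem.Dict Int Int :=
  nums1.foldl
    (fun d n =>
      if d.contains n = false then d.insert n 1
      else d.insert n (d.getD n 0 + 1))
    PySem.Dict.empty

-- second loop: consume nums2, early-returning False as A does
def sameNumbers2Consume (d : PySem.Dict Int Int) (nums2 : List Int) : Bool :=
  match nums2 with
  | [] => true
  | n :: rest =>
    if d.contains n = false then false
    else
      let d' := d.insert n (d.getD n 0 - 1)
      if d'.getD n 0 < 0 then false
      else sameNumbers2Consume d' rest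

def sameNumbers2 (nums1 : List Int) (nums2 : List Int) : Bool :=
  sameNumbers2Consume (sameNumbers2Build nums1) nums2

-- ===== PORT B =====
-- count1[n] = count1.get(n, 0) + 1 loops, then one comparison pass over count2.items()
def sameNumbers2_alt (nums1 : List Int) (nums2 : List Int) : Bool :=
  let count1 : PySem.Dict Int Int := nums1.foldl (fun d n => d.insert n (d.getD n 0 + 1)) PySem.Dict.empty
  let count2 : PySem.Dict Int Int := nums2.foldl (fun d n => d.insert n (d.getD n 0 + 1)) PySem.Dict.empty
  count2.items.all (fun p => !(count1.getD p.1 0 < p.2))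

-- ===== PRECONDITION & SPEC =====
def Spec_sameNumbers2 (nums1 : List Int) (nums2 : List Int) (out : Bool) : Prop := out = sameNumbers2_alt nums1 nums2
instance (nums1 : List Int) (nums2 : List Int) (out : Bool) : Decidable (Spec_sameNumbers2 nums1 nums2 out) := by unfold Spec_sameNumbers2; infer_instance

-- ===== CLAIM (what is proved, stated in full; the proofs are below) =====
def Claim_equal_sameNumbers2 : Prop := ∀ (nums1 : List Int) (nums2 : List Int), Dom_sameNumbers2 nums1 nums2 → Spec_sameNumbers2 nums1 nums2 (sameNumbers2 nums1 nums2)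

-- ===== LEMMAS AND PROOFS =====

-- A's build loop counts occurrences (both branches insert getD+1, since getD is 0 on a fresh key)
theorem build_getD (nums1 : List Int) (k : Int) :
    (sameNumbers2Build nums1).getD k 0 = (nums1.count k : Int) := by
  have h : sameNumbers2Build nums1 =
      nums1.foldl (fun d n => d.insert n (d.getD n 0 + 1)) PySem.Dict.empty := by
    unfold sameNumbers2Build
    congr 1
    funext d n
    by_cases hc : d.contains n = false
    · simp [hc, PySem.Dict.getD_of_not_contains d 0 hc]
    · simp [hc]
  rw [h, PySem.Dict.getD_foldl_insert_add_one]
  simp [PySem.Dict.getD_empty]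

-- characterisation of A's consume loop, for dicts with nonnegative counts
theorem consume_iff (nums2 : List Int) (d : PySem.Dict Int Int)
    (hpos : ∀ k, 0 ≤ d.getD k 0) :
    sameNumbers2Consume d nums2 = true ↔
      ∀ k ∈ nums2, (nums2.count k : Int) ≤ d.getD k 0 := by
  induction nums2 generalizing d with
  | nil => simp [sameNumbers2Consume]
  | cons n rest ih =>
    by_cases hc : d.contains n = false
    · have h0 : d.getD n 0 = 0 := PySem.Dict.getD_of_not_contains d 0 hc
      simp only [sameNumbers2Consume, hc, if_true]
      constructor
      · intro h; exact absurd h (by simp)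
      · intro h
        have h1 := h n (List.mem_cons_self)
        have h2 : 0 < (n :: rest).count n :=
          List.count_pos_iff.mpr (List.mem_cons_self)
        omega
    · have hc' : d.contains n = true := by revert hc; cases d.contains n <;> simp
      have hg : ∀ j, (d.insert n (d.getD n 0 - 1)).getD j 0 =
          if j = n then d.getD n 0 - 1 else d.getD j 0 := fun j =>
        PySem.Dict.getD_insert d n j (d.getD n 0 - 1) 0
      simp only [sameNumbers2Consume, hc', Bool.true_eq_false, if_false]
      by_cases hz : d.getD n 0 = 0
      · have hlt : (d.insert n (d.getD n 0 - 1)).getD n 0 < 0 := by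
          rw [hg]; simp [hz]
        simp only [hlt, if_true]
        constructor
        · intro h; exact absurd h (by simp)
        · intro h
          have h1 := h n (List.mem_cons_self)
          have h2 : 0 < (n :: rest).count n :=
            List.count_pos_iff.mpr (List.mem_cons_self)
          omega
      · have hge1 : 1 ≤ d.getD n 0 := by have := hpos n; omega
        have hnlt : ¬ (d.insert n (d.getD n 0 - 1)).getD n 0 < 0 := by
          rw [hg]; simp; omega
        simp only [hnlt, if_false]
        rw [ih _ (fun j => by rw [hg]; split <;> [omega; exact hpos j])]
        have hcnt_self : (n :: rest).count n = rest.count n + 1 :=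
          List.count_cons_self ..
        have hcnt_ne : ∀ j, j ≠ n → (n :: rest).count j = rest.count j := by
          intro j hj; exact List.count_cons_of_ne (Ne.symm hj)
        constructor
        · intro h k hk
          by_cases hkn : k = n
          · subst hkn
            by_cases hm : k ∈ rest
            · have := h k hm; rw [hg, if_pos rfl] at this
              rw [hcnt_self]; push_cast; omega
            · have : rest.count k = 0 := List.count_eq_zero.mpr hm
              rw [hcnt_self, this]; push_cast; omega
          · have hk' : k ∈ rest := by
              rcases List.mem_cons.mp hk with h1 | h1
              · exact absurd h1 hkn
              · exact h1
            have := h k hk'; rw [hg, if_neg hkn] at this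
            rw [hcnt_ne k hkn]; omega
        · intro h k hk
          rw [hg]
          have hk' : k ∈ n :: rest := List.mem_cons_of_mem _ hk
          have hle := h k hk'
          by_cases hkn : k = n
          · subst hkn
            rw [hcnt_self] at hle; rw [if_pos rfl]; push_cast at hle; omega
          · rw [hcnt_ne k hkn] at hle; rw [if_neg hkn]; omega

-- B's comparison pass says exactly "every key of nums2 has enough copies in nums1"
theorem alt_iff (nums1 nums2 : List Int) :
    sameNumbers2_alt nums1 nums2 = true ↔
      ∀ k ∈ nums2, (nums2.count k : Int) ≤ (nums1.count k : Int) := by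
  simp only [sameNumbers2_alt, PySem.Dict.foldl_insert_getD_add_one_eq_counter,
    PySem.Dict.items_counter]
  rw [List.all_eq_true]
  constructor
  · intro h k hk
    have hk' : k ∈ PySem.Set.ofList nums2 := (PySem.Set.mem_ofList nums2 k).mpr hk
    have := h _ (List.mem_map.mpr ⟨k, hk', rfl⟩)
    simpa [PySem.Dict.getD_counter] using this
  · intro h p hp
    rcases List.mem_map.mp hp with ⟨k, hk, rfl⟩
    have hk' : k ∈ nums2 := (PySem.Set.mem_ofList nums2 k).mp hk
    simp only [PySem.Dict.getD_counter, Bool.not_eq_eq_eq_not, Bool.not_true,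
      decide_eq_false_iff_not, not_lt]
    exact h k hk'

-- ===== VERDICT (by name: the statement is the Claim_ definition above) =====
theorem sameNumbers2_spec : Claim_equal_sameNumbers2 := by
  intro nums1 nums2 _
  unfold Spec_sameNumbers2
  have hA : sameNumbers2 nums1 nums2 = true ↔
      ∀ k ∈ nums2, (nums2.count k : Int) ≤ (nums1.count k : Int) := by
    unfold sameNumbers2
    rw [consume_iff nums2 (sameNumbers2Build nums1)
        (fun k => by rw [build_getD]; exact_mod_cast Int.natCast_nonneg _)]
    constructor
    · intro h k hk; have := h k hk; rwa [build_getD] at this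
    · intro h k hk; rw [build_getD]; exact h k hk
  have hB := alt_iff nums1 nums2
  cases hA' : sameNumbers2 nums1 nums2 <;> cases hB' : sameNumbers2_alt nums1 nums2
  · rfl
  · exact absurd ((hA.mpr (hB.mp hB'))) (by simp [hA'])
  · exact absurd (hB.mpr (hA.mp hA')) (by simp [hB'])
  · rfl
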